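-- pv_equiv track=rewrite | github.com/Nebizar/PTSZ | algorithms/132274/a2.py | checkTardinessForOneProcessor
-- ===== SOURCE A (Python) =====
-- def checkTardinessForOneProcessor(order, tasks):
--     tardiness = 0
--     start = 0
--     for t in order:
--         t = int(t) - 1
--         start = max(tasks[1][t], start)
--         end = start + tasks[0][t]
--         tardiness = tardiness + max(0, end - tasks[2][t])
--         start = end
--     return tardiness
-- ===== SOURCE B (Python) =====
-- def checkTardinessForOneProcessor(order, tasks):
--     # Closed-form end times: with P[k] = sum of processing times of the first k
--     # scheduled jobs and M_k = max(0, max_{j<=k}(release_j - P[j])), the k-th job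
--     # ends at P[k+1] + M_k (no max-with-previous-end recurrence needed).
--     idx = [int(t) - 1 for t in order]
--     P = [0]
--     for i in idx:
--         P.append(P[-1] + tasks[0][i])
--     tardiness = 0
--     M = 0
--     for k, i in enumerate(idx):
--         M = max(M, tasks[1][i] - P[k])
--         tardiness = tardiness + max(0, P[k + 1] + M - tasks[2][i])
--     return tardiness
-- ===== Notes on version B (the rewrite author's own statement) =====
-- stated objective: alternative
-- what changed: B computes each job's completion time by a closed form: a prefix-sum table P of processing times plus a running maximum of (release_j - P[j]), so end_k = P[k+1] + M_k; A instead carries the sequential recurrence start = max(release, previous end).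
import Mathlib
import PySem

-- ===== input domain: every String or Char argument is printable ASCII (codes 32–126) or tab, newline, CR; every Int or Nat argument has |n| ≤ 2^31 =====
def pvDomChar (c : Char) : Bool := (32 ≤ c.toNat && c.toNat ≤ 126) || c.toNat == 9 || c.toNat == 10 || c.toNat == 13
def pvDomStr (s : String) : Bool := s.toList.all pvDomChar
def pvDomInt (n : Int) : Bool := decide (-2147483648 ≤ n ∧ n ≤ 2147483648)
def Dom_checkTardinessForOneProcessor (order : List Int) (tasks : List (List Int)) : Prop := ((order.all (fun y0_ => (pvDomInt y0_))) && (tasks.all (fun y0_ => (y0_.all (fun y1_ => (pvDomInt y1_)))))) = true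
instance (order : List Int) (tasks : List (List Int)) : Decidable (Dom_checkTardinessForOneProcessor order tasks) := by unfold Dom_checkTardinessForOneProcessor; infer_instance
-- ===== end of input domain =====

-- B replaces A's sequential recurrence start = max(release, previous end) by a closed form:
-- a prefix-sum table P of processing times and a running maximum M of (release_j - P[j]),
-- so the k-th job ends at P[k+1] + M_k; same cost, different algorithm.

-- ===== PORT A =====
-- literal port of A: one loop carrying (tardiness, start); pyGetD is exact under Pre_ (all indexing in range)
def checkTardinessForOneProcessor (order : List Int) (tasks : List (List Int)) : Int :=
  (order.foldl (fun (st : Int × Int) t =>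
      let i := t - 1
      let start := max (PySem.List.pyGetD (PySem.List.pyGetD tasks 1 []) i 0) st.2
      let e := start + PySem.List.pyGetD (PySem.List.pyGetD tasks 0 []) i 0
      (st.1 + max 0 (e - PySem.List.pyGetD (PySem.List.pyGetD tasks 2 []) i 0), e))
    (0, 0)).1

-- ===== PORT B =====
-- literal port of Source B: build the prefix-sum table P, then fold over enumerate(idx)
-- carrying (tardiness, M), reading end times as P[k+1] + M
def checkTardinessForOneProcessor_alt (order : List Int) (tasks : List (List Int)) : Int :=
  let idx := order.map (fun t => t - 1)
  let P := idx.foldl (fun (P : List Int) i =>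
      P ++ [PySem.List.pyGetD P (-1) 0 + PySem.List.pyGetD (PySem.List.pyGetD tasks 0 []) i 0])
    [0]
  ((PySem.List.enumerate idx 0).foldl (fun (st : Int × Int) p =>
      let M := max st.2 (PySem.List.pyGetD (PySem.List.pyGetD tasks 1 []) p.2 0 - PySem.List.pyGetD P p.1 0)
      (st.1 + max 0 (PySem.List.pyGetD P (p.1 + 1) 0 + M - PySem.List.pyGetD (PySem.List.pyGetD tasks 2 []) p.2 0), M))
    (0, 0)).1

-- ===== PRECONDITION & SPEC =====
-- Pre_ excludes exactly the inputs where Python A raises IndexError: fewer than 3 task rows,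
-- or some order entry t with t-1 outside Python's index range of rows 0, 1 or 2.
def Pre_checkTardinessForOneProcessor (order : List Int) (tasks : List (List Int)) : Prop :=
  ∀ t ∈ order, 3 ≤ tasks.length ∧
    PySem.Raise.InRange (tasks.getD 0 []).length (t - 1) ∧
    PySem.Raise.InRange (tasks.getD 1 []).length (t - 1) ∧
    PySem.Raise.InRange (tasks.getD 2 []).length (t - 1)
instance (order : List Int) (tasks : List (List Int)) : Decidable (Pre_checkTardinessForOneProcessor order tasks) := by unfold Pre_checkTardinessForOneProcessor; infer_instance

def pvWitness_checkTardinessForOneProcessor : List Int × List (List Int) :=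
  ([1, 2], [[2, 1], [0, 0], [1, 5]])

def Spec_checkTardinessForOneProcessor (order : List Int) (tasks : List (List Int)) (out : Int) : Prop := out = checkTardinessForOneProcessor_alt order tasks
instance (order : List Int) (tasks : List (List Int)) (out : Int) : Decidable (Spec_checkTardinessForOneProcessor order tasks out) := by unfold Spec_checkTardinessForOneProcessor; infer_instance

-- ===== CLAIM (what is proved, stated in full; the proofs are below) =====
def Claim_equal_checkTardinessForOneProcessor : Prop := ∀ (order : List Int) (tasks : List (List Int)), Dom_checkTardinessForOneProcessor order tasks → Pre_checkTardinessForOneProcessor order tasks → Spec_checkTardinessForOneProcessor order tasks (checkTardinessForOneProcessor order tasks)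

-- ===== LEMMAS AND PROOFS =====

-- reference schedule: A's recurrence as a recursive function on the index list
def pvSpecSum (f0 f1 f2 : Int → Int) : List Int → Int → Int
  | [], _ => 0
  | i :: rest, e0 =>
      max 0 (max (f1 i) e0 + f0 i - f2 i) + pvSpecSum f0 f1 f2 rest (max (f1 i) e0 + f0 i)

theorem pvFoldA (f0 f1 f2 : Int → Int) :
    ∀ (order : List Int) (tard e0 : Int),
    (order.foldl (fun (st : Int × Int) t =>
        (st.1 + max 0 (max (f1 (t - 1)) st.2 + f0 (t - 1) - f2 (t - 1)),
         max (f1 (t - 1)) st.2 + f0 (t - 1))) (tard, e0)).1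
    = tard + pvSpecSum f0 f1 f2 (order.map (fun t => t - 1)) e0 := by
  intro order
  induction order with
  | nil => intro tard e0; simp [pvSpecSum]
  | cons t rest ih =>
      intro tard e0
      simp only [List.foldl, List.map_cons, pvSpecSum, ih]
      ring

-- B's first pass: the P table is [0] followed by the prefix sums
def pvPrefix (f0 : Int → Int) : List Int → Int → List Int
  | [], _ => []
  | i :: rest, s => (s + f0 i) :: pvPrefix f0 rest (s + f0 i)

theorem pvFoldP (f0 : Int → Int) :
    ∀ (idx : List Int) (acc : List Int) (s : Int), PySem.List.pyGetD acc (-1) 0 = s →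
    idx.foldl (fun (P : List Int) i => P ++ [PySem.List.pyGetD P (-1) 0 + f0 i]) acc
      = acc ++ pvPrefix f0 idx s := by
  intro idx
  induction idx with
  | nil => intro acc s _; simp [pvPrefix]
  | cons i rest ih =>
      intro acc s hs
      simp only [List.foldl, pvPrefix, hs]
      rw [ih (acc ++ [s + f0 i]) (s + f0 i) (by simp [PySem.List.pyGetD_neg_one_append_singleton])]
      simp

-- reading the P table: P[k] is the sum of the first k processing times
theorem pvGetP (f0 : Int → Int) :
    ∀ (idx : List Int) (k : Nat), k ≤ idx.length →
    (0 :: pvPrefix f0 idx 0).getD k 0 = ((idx.take k).map f0).sum := by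
  have key : ∀ (idx : List Int) (s : Int) (k : Nat), k < idx.length →
      (pvPrefix f0 idx s).getD k 0 = s + ((idx.take (k + 1)).map f0).sum := by
    intro idx
    induction idx with
    | nil => intro s k h; simp at h
    | cons i rest ih =>
        intro s k h
        cases k with
        | zero => simp [pvPrefix]
        | succ k =>
            simp only [pvPrefix, List.getD_cons_succ, List.take_succ_cons, List.map_cons,
              List.sum_cons]
            rw [ih (s + f0 i) k (by simpa using h)]
            ring
  intro idx k hk
  cases k with
  | zero => simp
  | succ k =>
      simp only [List.getD_cons_succ]
      rw [key idx 0 k (by omega)]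
      simp

-- B's second pass equals the reference schedule, given the invariant start = P[k] + M
theorem pvFoldB (f0 f1 f2 : Int → Int) (idx : List Int) :
    ∀ (l : List Int) (k : Nat) (tard M : Int), idx.drop k = l →
    ((PySem.List.enumerate l (k : Int)).foldl (fun (st : Int × Int) p =>
        (st.1 + max 0 (PySem.List.pyGetD ([0] ++ pvPrefix f0 idx 0) (p.1 + 1) 0
            + max st.2 (f1 p.2 - PySem.List.pyGetD ([0] ++ pvPrefix f0 idx 0) p.1 0)
            - f2 p.2),
         max st.2 (f1 p.2 - PySem.List.pyGetD ([0] ++ pvPrefix f0 idx 0) p.1 0))) (tard, M)).1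
    = tard + pvSpecSum f0 f1 f2 l (((idx.take k).map f0).sum + M) := by
  intro l
  induction l with
  | nil => intro k tard M _; simp [pvSpecSum]
  | cons i rest ih =>
      intro k tard M hdrop
      have hk : k < idx.length := by
        by_contra h
        rw [List.drop_eq_nil_of_le (by omega)] at hdrop
        exact List.cons_ne_nil i rest hdrop.symm
      have hget : idx[k]? = some i := by
        have : (idx.drop k)[0]? = some i := by rw [hdrop]; rfl
        simpa using this
      have htake : idx.take (k + 1) = idx.take k ++ [i] := by
        rw [List.take_add_one, hget]; rfl
      have hdrop' : idx.drop (k + 1) = rest := by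
        have := congrArg (List.drop 1) hdrop
        simpa [List.drop_drop, Nat.add_comm] using this
      rw [PySem.List.enumerate_cons, List.foldl_cons]
      have hcast : ((k : Int) + 1) = ((k + 1 : Nat) : Int) := by push_cast; ring
      have hPk : PySem.List.pyGetD ([0] ++ pvPrefix f0 idx 0) (k : Int) 0
          = ((idx.take k).map f0).sum := by
        rw [PySem.List.pyGetD_natCast]
        exact pvGetP f0 idx k (by omega)
      have hPk1 : PySem.List.pyGetD ([0] ++ pvPrefix f0 idx 0) ((k : Int) + 1) 0
          = ((idx.take (k + 1)).map f0).sum := by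
        rw [hcast, PySem.List.pyGetD_natCast]
        exact pvGetP f0 idx (k + 1) (by omega)
      simp only [hcast]
      rw [ih (k + 1) _ _ hdrop']
      rw [← hcast]
      simp only [pvSpecSum, hPk, hPk1]
      have hP : ((idx.take (k + 1)).map f0).sum = ((idx.take k).map f0).sum + f0 i := by
        rw [htake]; simp
      rw [hP]
      have harg : ((idx.take k).map f0).sum + f0 i + max M (f1 i - ((idx.take k).map f0).sum)
          = max (f1 i) (((idx.take k).map f0).sum + M) + f0 i := by omega
      rw [harg]
      ring

theorem checkTardinessForOneProcessor_eq (order : List Int) (tasks : List (List Int)) :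
    checkTardinessForOneProcessor order tasks = checkTardinessForOneProcessor_alt order tasks := by
  simp only [checkTardinessForOneProcessor, checkTardinessForOneProcessor_alt]
  rw [pvFoldA (fun i => PySem.List.pyGetD (PySem.List.pyGetD tasks 0 []) i 0)
      (fun i => PySem.List.pyGetD (PySem.List.pyGetD tasks 1 []) i 0)
      (fun i => PySem.List.pyGetD (PySem.List.pyGetD tasks 2 []) i 0) order 0 0]
  rw [pvFoldP (fun i => PySem.List.pyGetD (PySem.List.pyGetD tasks 0 []) i 0)
      (order.map (fun t => t - 1)) [0] 0 (by decide)]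
  have := pvFoldB (fun i => PySem.List.pyGetD (PySem.List.pyGetD tasks 0 []) i 0)
      (fun i => PySem.List.pyGetD (PySem.List.pyGetD tasks 1 []) i 0)
      (fun i => PySem.List.pyGetD (PySem.List.pyGetD tasks 2 []) i 0)
      (order.map (fun t => t - 1)) (order.map (fun t => t - 1)) 0 0 0 rfl
  simp only [Nat.cast_zero, List.take_zero, List.map_nil, List.sum_nil, zero_add, add_zero] at this ⊢
  exact this.symm

-- ===== VERDICT (by name: the statement is the Claim_ definition above) =====
theorem checkTardinessForOneProcessor_spec : Claim_equal_checkTardinessForOneProcessor := by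
  intro order tasks _ _
  exact checkTardinessForOneProcessor_eq order tasks
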